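-- pv_equiv track=rewrite | github.com/graphsignal/solver-demo | solutions/1008-C.py | maximum_elements_greater_than_original
-- ===== SOURCE A (Python) =====
-- def maximum_elements_greater_than_original(n, array):
--     # Step 1: Sort the array
--     sorted_array = sorted(array)
--
--     # Step 2: Use two pointers
--     i, j = 0, (n + 1) // 2  # j starts from the middle point
--     count = 0
--
--     # Step 3: Try to place elements from the second half to maximize elements > original
--     while i < (n + 1) // 2 and j < n:
--         if sorted_array[j] > sorted_array[i]:
--             # Successfully found a position where the element from second half is larger
--             count += 1
--             i += 1
--         j += 1
--
--     # Step 4: Return the maximum number of such positions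
--     return count
-- ===== SOURCE B (Python) =====
-- def maximum_elements_greater_than_original(n, array):
--     # Binary search on the answer: the k smallest of the lower half can all be
--     # beaten iff the k largest of the upper half dominate them pointwise.
--     if n <= 0:
--         return 0
--     s = sorted(array)
--     h = (n + 1) // 2
--     lower = s[:h]
--     upper = s[h:n]
--     m = len(upper)
--
--     def feasible(k):
--         return all(lower[i] < upper[m - k + i] for i in range(k))
--
--     lo, hi = 0, min(h, m)
--     while lo < hi:
--         mid = (lo + hi + 1) // 2
--         if feasible(mid):
--             lo = mid
--         else:
--             hi = mid - 1
--     return lo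
-- ===== Notes on version B (the rewrite author's own statement) =====
-- stated objective: alternative
-- what changed: Replaces A's two-pointer greedy sweep over the two sorted halves by a lower-bound binary search on the answer k, with the feasibility test 'the k smallest lower-half elements are pointwise beaten by the k largest upper-half elements'.
import Mathlib
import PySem

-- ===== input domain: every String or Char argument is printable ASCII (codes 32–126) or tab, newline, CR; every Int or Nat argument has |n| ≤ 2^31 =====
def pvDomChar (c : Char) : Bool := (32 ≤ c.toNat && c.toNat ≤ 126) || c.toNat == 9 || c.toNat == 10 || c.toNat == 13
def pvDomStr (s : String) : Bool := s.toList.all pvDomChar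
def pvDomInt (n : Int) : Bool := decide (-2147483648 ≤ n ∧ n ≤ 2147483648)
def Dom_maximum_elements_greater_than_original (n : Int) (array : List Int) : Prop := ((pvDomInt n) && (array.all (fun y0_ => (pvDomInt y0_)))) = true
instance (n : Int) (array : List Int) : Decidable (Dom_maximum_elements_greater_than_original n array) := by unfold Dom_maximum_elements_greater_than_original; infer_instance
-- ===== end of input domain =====

-- B replaces A's two-pointer greedy sweep by a binary search on the answer k
-- (feasibility: the k smallest of the lower half each beaten by the k largest of
-- the upper half); objective: alternative algorithm, same sort-dominated cost.

-- ===== PORT A =====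
-- A's while loop: state (i, j, count); fuel = number of remaining j-steps (j increments every iteration).
def pvALoop (s : List Int) (n h : Int) : Nat → Int → Int → Int → Int
  | 0, _, _, count => count
  | fuel + 1, i, j, count =>
    if i < h ∧ j < n then
      if PySem.List.pyGetD s j 0 > PySem.List.pyGetD s i 0 then
        pvALoop s n h fuel (i + 1) (j + 1) (count + 1)
      else
        pvALoop s n h fuel i (j + 1) count
    else count

def maximum_elements_greater_than_original (n : Int) (array : List Int) : Int :=
  let sorted_array := PySem.List.sorted array (fun x => x) false
  let h := PySem.Int.floordiv (n + 1) 2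
  pvALoop sorted_array n h (n - h).toNat 0 h 0

-- ===== PORT B =====
-- feasible(k) = all(lower[i] < upper[m - k + i] for i in range(k))
def pvFeasible (lower upper : List Int) (m k : Int) : Bool :=
  (PySem.List.pyRange 0 k 1).all
    (fun i => PySem.List.pyGetD lower i 0 < PySem.List.pyGetD upper (m - k + i) 0)

-- the lower-bound binary search loop; fuel = (hi - lo).toNat bounds the iterations
def pvBSearch (lower upper : List Int) (m : Int) : Nat → Int → Int → Int
  | 0, lo, _ => lo
  | fuel + 1, lo, hi =>
    if lo < hi then
      let mid := PySem.Int.floordiv (lo + hi + 1) 2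
      if pvFeasible lower upper m mid then pvBSearch lower upper m fuel mid hi
      else pvBSearch lower upper m fuel lo (mid - 1)
    else lo

def maximum_elements_greater_than_original_alt (n : Int) (array : List Int) : Int :=
  if n ≤ 0 then 0
  else
    let s := PySem.List.sorted array (fun x => x) false
    let h := PySem.Int.floordiv (n + 1) 2
    let lower := PySem.List.slice s none (some h)
    let upper := PySem.List.slice s (some h) (some n)
    let m : Int := upper.length
    pvBSearch lower upper m (min h m - 0).toNat 0 (min h m)

-- ===== PRECONDITION & SPEC =====
-- A raises IndexError exactly when 2 ≤ n and the array is shorter than n; those inputs are excluded.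
def Pre_maximum_elements_greater_than_original (n : Int) (array : List Int) : Prop :=
  n ≤ array.length ∨ n ≤ 1
instance (n : Int) (array : List Int) : Decidable (Pre_maximum_elements_greater_than_original n array) := by unfold Pre_maximum_elements_greater_than_original; infer_instance

def pvWitness_maximum_elements_greater_than_original : Int × List Int := (4, [3, 1, 2, 2])

def Spec_maximum_elements_greater_than_original (n : Int) (array : List Int) (out : Int) : Prop := out = maximum_elements_greater_than_original_alt n array
instance (n : Int) (array : List Int) (out : Int) : Decidable (Spec_maximum_elements_greater_than_original n array out) := by unfold Spec_maximum_elements_greater_than_original; infer_instance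

-- ===== CLAIM (what is proved, stated in full; the proofs are below) =====
def Claim_equal_maximum_elements_greater_than_original : Prop := ∀ (n : Int) (array : List Int), Dom_maximum_elements_greater_than_original n array → Pre_maximum_elements_greater_than_original n array → Spec_maximum_elements_greater_than_original n array (maximum_elements_greater_than_original n array)

-- ===== LEMMAS AND PROOFS =====

-- A's greedy matching in structural form: scan the upper list, consuming a lower
-- element whenever the current upper element beats it.
def pvGreedy : List Int → List Int → Nat
  | _, [] => 0
  | [], _ :: _ => 0
  | a :: L, b :: R => if a < b then pvGreedy L R + 1 else pvGreedy (a :: L) R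

def pvFeas (L R : List Int) (k : Nat) : Prop :=
  ∀ i : Nat, i < k → L.getD i 0 < R.getD (R.length - k + i) 0
theorem pvGreedy_le (L R : List Int) : pvGreedy L R ≤ L.length ∧ pvGreedy L R ≤ R.length := by
  induction R generalizing L with
  | nil => cases L <;> simp [pvGreedy]
  | cons b R ih =>
    cases L with
    | nil => simp [pvGreedy]
    | cons a L' =>
      simp only [pvGreedy]
      split
      · have := ih L'
        simp only [List.length_cons]; omega
      · have := ih (a :: L')
        simp only [List.length_cons] at *; omega

theorem pvFeas_greedy (L R : List Int) (hR : R.Pairwise (· ≤ ·)) : pvFeas L R (pvGreedy L R) := by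
  induction R generalizing L with
  | nil => intro i hi; simp [pvGreedy] at hi
  | cons b R' ih =>
    rcases List.pairwise_cons.mp hR with ⟨hb, hR'⟩
    cases L with
    | nil => intro i hi; simp [pvGreedy] at hi
    | cons a L' =>
      simp only [pvGreedy]
      split
      · rename_i hab
        have hg' := pvGreedy_le L' R'
        have hfe := ih L' hR'
        intro i hi
        have hidx : (b :: R').length - (pvGreedy L' R' + 1) + i = R'.length - pvGreedy L' R' + i := by
          simp only [List.length_cons]; omega
        rw [hidx]
        cases i with
        | zero =>
          simp only [List.getD_cons_zero, Nat.add_zero]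
          by_cases hgr : pvGreedy L' R' = R'.length
          · have : R'.length - pvGreedy L' R' = 0 := by omega
            rw [this, List.getD_cons_zero]; exact hab
          · have hlt : R'.length - pvGreedy L' R' - 1 < R'.length := by omega
            have : R'.length - pvGreedy L' R' = (R'.length - pvGreedy L' R' - 1) + 1 := by omega
            rw [this, List.getD_cons_succ, List.getD_eq_getElem R' 0 hlt]
            exact lt_of_lt_of_le hab (hb _ (List.getElem_mem hlt))
        | succ i' =>
          have : R'.length - pvGreedy L' R' + (i' + 1) = (R'.length - pvGreedy L' R' + i') + 1 := by omega
          rw [this, List.getD_cons_succ, List.getD_cons_succ]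
          exact hfe i' (by omega)
      · have hg := pvGreedy_le (a :: L') R'
        have hfe := ih (a :: L') hR'
        intro i hi
        have hidx : (b :: R').length - pvGreedy (a :: L') R' + i
            = (R'.length - pvGreedy (a :: L') R' + i) + 1 := by
          simp only [List.length_cons]; omega
        rw [hidx, List.getD_cons_succ]
        exact hfe i hi

theorem pvFeas_mono (L R : List Int) (hR : R.Pairwise (· ≤ ·)) (j k : Nat)
    (hjk : j ≤ k) (hkR : k ≤ R.length) (hk : pvFeas L R k) : pvFeas L R j := by
  intro i hi
  have h1 := hk i (by omega)
  have hik : R.length - k + i < R.length := by omega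
  have hij : R.length - j + i < R.length := by omega
  rw [List.getD_eq_getElem R 0 hik] at h1
  rw [List.getD_eq_getElem R 0 hij]
  rcases Nat.lt_or_ge (R.length - k + i) (R.length - j + i) with hlt | hge
  · exact lt_of_lt_of_le h1 (List.pairwise_iff_getElem.mp hR _ _ hik hij hlt)
  · have heq : R.length - j + i = R.length - k + i := by omega
    exact lt_of_lt_of_eq h1 (getElem_congr rfl heq.symm hik)

theorem pvLe_greedy (L R : List Int) (k : Nat) (hkL : k ≤ L.length) (hkR : k ≤ R.length)
    (hk : pvFeas L R k) : k ≤ pvGreedy L R := by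
  induction R generalizing L k with
  | nil => simp at hkR; omega
  | cons b R' ih =>
    cases L with
    | nil => simp at hkL; omega
    | cons a L' =>
      simp only [pvGreedy]
      split
      · rename_i hab
        cases k with
        | zero => omega
        | succ k' =>
          have hfe : pvFeas L' R' k' := by
            intro i hi
            have := hk (i + 1) (by omega)
            have hidx : (b :: R').length - (k' + 1) + (i + 1)
                = (R'.length - k' + i) + 1 := by simp only [List.length_cons] at hkR ⊢; omega
            rw [hidx, List.getD_cons_succ, List.getD_cons_succ] at this
            exact this
          have := ih L' k' (by simp at hkL; omega) (by simp at hkR; omega) hfe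
          omega
      · rename_i hab
        cases k with
        | zero => omega
        | succ k' =>
          have hkR' : k' + 1 ≤ R'.length := by
            by_contra hcon
            have hkeq : k' + 1 = R'.length + 1 := by simp at hkR; omega
            have := hk 0 (by omega)
            have hidx : (b :: R').length - (k' + 1) + 0 = 0 := by
              simp only [List.length_cons]; omega
            rw [hidx, List.getD_cons_zero, List.getD_cons_zero] at this
            exact hab this
          have hfe : pvFeas (a :: L') R' (k' + 1) := by
            intro i hi
            have := hk i hi
            have hidx : (b :: R').length - (k' + 1) + i = (R'.length - (k' + 1) + i) + 1 := by
              simp only [List.length_cons]; omega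
            rw [hidx, List.getD_cons_succ] at this
            exact this
          exact ih (a :: L') (k' + 1) hkL hkR' hfe
theorem pvALoop_eq_greedy (s : List Int) (n h : Int)
    (hh : 0 ≤ h) (hhn : h ≤ n) (hlen : n ≤ (s.length : Int)) :
    ∀ (fuel : Nat) (I J : Nat) (c : Int), fuel = n.toNat - J → I ≤ h.toNat → h.toNat ≤ J →
    pvALoop s n h fuel (I : Int) (J : Int) c =
      c + pvGreedy ((s.take h.toNat).drop I) ((s.take n.toNat).drop J) := by
  intro fuel
  induction fuel with
  | zero =>
    intro I J c hf hI hJ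
    have hJn : n.toNat ≤ J := by omega
    have hdrop : (s.take n.toNat).drop J = [] := by
      apply List.drop_eq_nil_of_le
      simp only [List.length_take]; omega
    rw [hdrop]
    simp [pvALoop, pvGreedy]
  | succ fuel ih =>
    intro I J c hf hI hJ
    have hJn : J < n.toNat := by omega
    have hJs : J < s.length := by omega
    have hlt : (J : Int) < n := by omega
    simp only [pvALoop]
    have htklen : (s.take n.toNat).length = n.toNat := by simp; omega
    have hRcons : (s.take n.toNat).drop J = s[J] :: (s.take n.toNat).drop (J + 1) := by
      rw [← List.getElem_cons_drop (by omega : J < (s.take n.toNat).length)]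
      congr 1
      exact List.getElem_take
    by_cases hIlt : I < h.toNat
    · have hIs : I < s.length := by omega
      have hcond : ((I : Int) < h ∧ (J : Int) < n) := by constructor <;> omega
      rw [if_pos hcond]
      have hLcons : (s.take h.toNat).drop I = s[I] :: (s.take h.toNat).drop (I + 1) := by
        rw [← List.getElem_cons_drop (by simp; omega : I < (s.take h.toNat).length)]
        congr 1
        exact List.getElem_take
      have hgJ : PySem.List.pyGetD s (J : Int) 0 = s[J] := by
        rw [PySem.List.pyGetD_natCast, List.getD_eq_getElem s 0 hJs]
      have hgI : PySem.List.pyGetD s (I : Int) 0 = s[I] := by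
        rw [PySem.List.pyGetD_natCast, List.getD_eq_getElem s 0 hIs]
      rw [hgJ, hgI, hRcons, hLcons]
      by_cases hab : s[I] < s[J]
      · rw [if_pos (by exact hab), pvGreedy, if_pos hab]
        have := ih (I + 1) (J + 1) (c + 1) (by omega) (by omega) (by omega)
        push_cast at this
        rw [this]; push_cast; ring
      · rw [if_neg (by exact hab), pvGreedy, if_neg hab]
        have := ih I (J + 1) c (by omega) (by omega) (by omega)
        push_cast at this
        rw [this, ← hLcons]
    · have hIeq : I = h.toNat := by omega
      have hLnil : (s.take h.toNat).drop I = [] := by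
        apply List.drop_eq_nil_of_le; simp; omega
      rw [if_neg (by intro hcon; exact hIlt (by omega)), hLnil, hRcons]
      simp [pvGreedy]
theorem pvFeasible_iff (L R : List Int) (K : Nat) (_hKL : K ≤ L.length) (hKR : K ≤ R.length) :
    pvFeasible L R (R.length : Int) (K : Int) = true ↔ pvFeas L R K := by
  unfold pvFeasible pvFeas
  rw [PySem.List.pyRange_zero_natCast]
  rw [List.all_eq_true]
  constructor
  · intro hall i hi
    have := hall (i : Int) (by
      simp only [List.mem_map]
      exact ⟨i, List.mem_range.mpr hi, rfl⟩)
    have hidx : ((R.length : Int) - (K : Int) + (i : Int)) = ((R.length - K + i : Nat) : Int) := by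
      push_cast; omega
    rw [hidx, PySem.List.pyGetD_natCast, PySem.List.pyGetD_natCast] at this
    exact of_decide_eq_true this
  · intro hfe x hx
    simp only [List.mem_map, List.mem_range] at hx
    rcases hx with ⟨i, hi, rfl⟩
    have hidx : ((R.length : Int) - (K : Int) + (i : Int)) = ((R.length - K + i : Nat) : Int) := by
      push_cast; omega
    rw [hidx, PySem.List.pyGetD_natCast, PySem.List.pyGetD_natCast]
    exact decide_eq_true (hfe i hi)

theorem pvBSearch_eq (L R : List Int) (hR : R.Pairwise (· ≤ ·)) (N : Nat)
    (hN : N = min L.length R.length) :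
    ∀ (fuel : Nat) (lo hi : Int), 0 ≤ lo → lo ≤ (pvGreedy L R : Int) →
      (pvGreedy L R : Int) ≤ hi → hi ≤ (N : Int) → (hi - lo).toNat ≤ fuel →
      pvBSearch L R (R.length : Int) fuel lo hi = (pvGreedy L R : Int) := by
  intro fuel
  induction fuel with
  | zero =>
    intro lo hi h0 hlog hghi hhiN hfuel
    have : hi ≤ lo := by omega
    simp only [pvBSearch]
    omega
  | succ fuel ih =>
    intro lo hi h0 hlog hghi hhiN hfuel
    simp only [pvBSearch]
    split
    · rename_i hlohi
      have hdm := PySem.Int.floordiv_mul_add_mod (lo + hi + 1) 2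
      have hm0 := PySem.Int.mod_nonneg (lo + hi + 1) (by omega : (0:Int) < 2)
      have hm1 := PySem.Int.mod_lt (lo + hi + 1) (by omega : (0:Int) < 2)
      set mid := PySem.Int.floordiv (lo + hi + 1) 2 with hmid
      have hmidlo : lo < mid := by omega
      have hmidhi : mid ≤ hi := by omega
      have hmidnn : 0 ≤ mid := by omega
      have hmKcast : ((mid.toNat : Nat) : Int) = mid := by omega
      have hmKL : mid.toNat ≤ L.length := by omega
      have hmKR : mid.toNat ≤ R.length := by omega
      have hgle := pvGreedy_le L R
      split
      · rename_i hfeas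
        have hmid_le_g : mid ≤ (pvGreedy L R : Int) := by
          rw [← hmKcast] at hfeas ⊢
          have := (pvFeasible_iff L R mid.toNat hmKL hmKR).mp hfeas
          have := pvLe_greedy L R mid.toNat hmKL hmKR this
          omega
        exact ih mid hi (by omega) (by omega) hghi hhiN (by omega)
      · rename_i hfeas
        have hg_lt_mid : (pvGreedy L R : Int) < mid := by
          by_contra hcon
          push Not at hcon
          apply hfeas
          rw [← hmKcast]
          apply (pvFeasible_iff L R mid.toNat hmKL hmKR).mpr
          exact pvFeas_mono L R hR mid.toNat (pvGreedy L R) (by omega) (by omega)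
            (pvFeas_greedy L R hR)
        exact ih lo (mid - 1) h0 hlog (by omega) (by omega) (by omega)
    · rename_i hlohi
      omega

-- ===== VERDICT (by name: the statement is the Claim_ definition above) =====
theorem maximum_elements_greater_than_original_spec : Claim_equal_maximum_elements_greater_than_original := by
  intro n array _hdom hpre
  unfold Spec_maximum_elements_greater_than_original
  have hdm := PySem.Int.floordiv_mul_add_mod (n + 1) 2
  have hm0 := PySem.Int.mod_nonneg (n + 1) (by omega : (0:Int) < 2)
  have hm1 := PySem.Int.mod_lt (n + 1) (by omega : (0:Int) < 2)
  set s := PySem.List.sorted array (fun x => x) false with hs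
  set h := PySem.Int.floordiv (n + 1) 2 with hh
  have hslen : s.length = array.length := PySem.List.length_sorted array (fun x => x) false
  have hA : maximum_elements_greater_than_original n array
      = pvALoop s n h (n - h).toNat 0 h 0 := rfl
  rcases le_or_gt n 0 with hn0 | hn0
  · -- n ≤ 0 : both sides are 0
    have hfuel : (n - h).toNat = 0 := by omega
    have hA0 : maximum_elements_greater_than_original n array = 0 := by
      rw [hA, hfuel]; rfl
    have halt0 : maximum_elements_greater_than_original_alt n array = 0 := by
      unfold maximum_elements_greater_than_original_alt
      rw [if_pos hn0]
    rw [hA0, halt0]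
  · rcases eq_or_lt_of_le (by omega : (1:Int) ≤ n) with hn1 | hn2
    · -- n = 1 : both sides are 0
      have hh1 : h = 1 := by omega
      have hA0 : maximum_elements_greater_than_original n array = 0 := by
        rw [hA, hh1, ← hn1]
        norm_num
        rfl
      have halt0 : maximum_elements_greater_than_original_alt n array = 0 := by
        unfold maximum_elements_greater_than_original_alt
        rw [if_neg (by omega)]
        show pvBSearch _ (PySem.List.slice s (some h) (some n)) _ _ _ _ = 0
        have hup : PySem.List.slice s (some h) (some n) = [] := by
          rw [PySem.List.slice_toNat s (by omega) (by omega)]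
          have : n.toNat - h.toNat = 0 := by omega
          rw [this, List.take_zero]
        rw [hup]
        show pvBSearch _ _ _ (min h ((0:Nat) : Int) - 0).toNat 0 (min h ((0:Nat) : Int)) = 0
        have hmin : min h ((0:Nat):Int) = 0 := by
          simp; omega
        rw [hmin]
        rfl
      rw [hA0, halt0]
    · -- 2 ≤ n, and by Pre_ : n ≤ array.length
      have hnlen : n ≤ (array.length : Int) := by
        rcases hpre with hp | hp
        · exact hp
        · omega
      have hh1 : 1 ≤ h := by omega
      have hhn : h ≤ n := by omega
      have hnslen : n ≤ (s.length : Int) := by rw [hslen]; exact hnlen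
      set L := s.take h.toNat with hL
      set R := (s.drop h.toNat).take (n.toNat - h.toNat) with hR
      have hRalt : (s.take n.toNat).drop h.toNat = R := by
        rw [List.drop_take]
      have hlenL : L.length = h.toNat := by
        rw [hL, List.length_take]; omega
      have hlenR : R.length = n.toNat - h.toNat := by
        rw [hR, List.length_take, List.length_drop]; omega
      have hssorted : s.Pairwise (· ≤ ·) := by
        have := PySem.List.sorted_pairwise array (fun x => x)
        simpa using this
      have hRsorted : R.Pairwise (· ≤ ·) := by
        apply List.Pairwise.sublist _ hssorted
        exact (List.take_sublist _ _).trans (List.drop_sublist _ _)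
      set g := pvGreedy L R with hg
      have hgle := pvGreedy_le L R
      -- side A
      have hA2 : maximum_elements_greater_than_original n array = (g : Int) := by
        rw [hA, (by omega : (n - h).toNat = n.toNat - h.toNat)]
        have hstep := pvALoop_eq_greedy s n h (by omega) hhn hnslen
          (n.toNat - h.toNat) 0 h.toNat 0 rfl (Nat.zero_le _) (le_refl _)
        rw [List.drop_zero, hRalt, ← hL, ← hg,
          Int.toNat_of_nonneg (by omega : (0:Int) ≤ h)] at hstep
        simpa using hstep
      -- side B
      have halt2 : maximum_elements_greater_than_original_alt n array = (g : Int) := by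
        unfold maximum_elements_greater_than_original_alt
        rw [if_neg (by omega)]
        show pvBSearch (PySem.List.slice s none (some h)) (PySem.List.slice s (some h) (some n))
          _ _ _ _ = (g : Int)
        have hlow : PySem.List.slice s none (some h) = L := by
          rw [PySem.List.slice_to s (by omega)]
        have hup : PySem.List.slice s (some h) (some n) = R := by
          rw [PySem.List.slice_toNat s (by omega) (by omega)]
        rw [hlow, hup]
        set N : Nat := min L.length R.length with hN
        have hminh : min h ((R.length : Nat) : Int) = (N : Int) := by
          rw [hN, hlenL]
          push_cast
          omega
        show pvBSearch L R ((R.length : Nat) : Int)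
          (min h ((R.length : Nat) : Int) - 0).toNat 0 (min h ((R.length : Nat) : Int)) = (g : Int)
        rw [hminh]
        apply pvBSearch_eq L R hRsorted N rfl
        · omega
        · omega
        · omega
        · omega
        · omega
      rw [hA2, halt2]
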